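-- pv_equiv track=rewrite | github.com/verivital/behaverify | src/smv_writer.py | create_node_to_descendants_map
-- ===== SOURCE A (Python) =====
-- def create_node_to_descendants_map(nodes, children, leaf_set):
--     #method explanation
--     #go through all the nodes in order
--     #add a set() for each node
--     #if we find a node without children, go back up until we reach -1. for each stop along the way, add the node without children.
--
--     #so this method only adds leaf nodes????
--     node_to_descendants_map = {}
--     for node_id in range(len(nodes)):
--         node_to_descendants_map[node_id] = set()
--         # if node_id in leaf_set or node_id not in children or len(children[node_id]) == 0:
--         #     #this is a terminus point
--         #     cur_id = nodes[node_id][1]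
--         #     while not cur_id == -1:
--         #         node_to_descendants_map[cur_id].add(node_id)
--         #         cur_id = nodes[cur_id][1]
--         cur_id = nodes[node_id][1]
--         while not cur_id == -1:
--             node_to_descendants_map[cur_id].add(node_id)
--             cur_id = nodes[cur_id][1]
--     return node_to_descendants_map
-- ===== SOURCE B (Python) =====
-- def create_node_to_descendants_map(nodes, children, leaf_set):
--     # Memoized ancestor-path DP: anc[j] is the ancestor chain of j (parent first),
--     # computed once per node by sharing anc[parent]; then scatter j into desc[a]
--     # for each ancestor a.  No repeated pointer-chasing while-loop.
--     n = len(nodes)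
--     anc = []
--     for j in range(n):
--         p = nodes[j][1]
--         anc.append([] if p == -1 else [p] + anc[p])
--     desc = {j: set() for j in range(n)}
--     for j in range(n):
--         for a in anc[j]:
--             desc[a].add(j)
--     return desc
-- ===== Notes on version B (the rewrite author's own statement) =====
-- stated objective: alternative
-- what changed: Replaces A's per-node while-loop pointer-chase up the parent chain by a two-phase dynamic program: anc[j] = [parent] + anc[parent] memoizes each ancestor path once, then a scatter pass adds j to desc[a] for each ancestor a.
import Mathlib
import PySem

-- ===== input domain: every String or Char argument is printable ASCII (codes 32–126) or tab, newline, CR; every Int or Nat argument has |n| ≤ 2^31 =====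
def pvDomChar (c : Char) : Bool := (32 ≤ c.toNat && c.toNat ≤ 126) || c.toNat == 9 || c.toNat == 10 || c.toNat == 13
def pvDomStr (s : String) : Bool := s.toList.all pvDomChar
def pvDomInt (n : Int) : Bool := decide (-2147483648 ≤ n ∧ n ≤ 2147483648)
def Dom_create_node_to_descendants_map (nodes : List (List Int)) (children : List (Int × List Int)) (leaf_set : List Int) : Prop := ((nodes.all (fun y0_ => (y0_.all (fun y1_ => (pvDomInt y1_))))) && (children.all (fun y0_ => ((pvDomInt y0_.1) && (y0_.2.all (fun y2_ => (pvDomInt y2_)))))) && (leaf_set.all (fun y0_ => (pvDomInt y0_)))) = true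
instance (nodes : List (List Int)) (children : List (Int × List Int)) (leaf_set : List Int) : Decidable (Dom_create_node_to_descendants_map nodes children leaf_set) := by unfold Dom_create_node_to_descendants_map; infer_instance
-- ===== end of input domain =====

-- B replaces A's per-node while-loop pointer-chase by a memoized ancestor-path DP plus a scatter pass (alternative decomposition, same cost); equal output proved on Pre_ (well-formed parent pointers).


-- ===== PORT A =====
-- nodes[i][1] (in-range under Pre_; the defaults are totality guards only)
def pvParent (nodes : List (List Int)) (i : Int) : Int :=
  PySem.List.pyGetD (PySem.List.pyGetD nodes i []) 1 0

-- the 'while not cur_id == -1' loop; fuel = len(nodes) suffices under Pre_ (ids strictly decrease)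
def pvWalkA (nodes : List (List Int)) : Nat → Int → Int → PySem.Dict Int (PySem.Set Int) → PySem.Dict Int (PySem.Set Int)
  | 0, _, _, m => m
  | fuel+1, cur, j, m =>
    if cur = -1 then m
    else pvWalkA nodes fuel (pvParent nodes cur) j
          (m.modify cur PySem.Set.empty (fun s => PySem.Set.add s j))

def create_node_to_descendants_map (nodes : List (List Int)) (children : List (Int × List Int)) (leaf_set : List Int) : List (Int × List Int) :=
  ((PySem.List.pyRange 0 (nodes.length : Int) 1).foldl
    (fun m j => pvWalkA nodes nodes.length (pvParent nodes j) j (m.insert j PySem.Set.empty))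
    PySem.Dict.empty).items

-- ===== PORT B =====
-- anc.append([] if p == -1 else [p] + anc[p])
def pvBuildAnc (nodes : List (List Int)) : List (List Int) :=
  (PySem.List.pyRange 0 (nodes.length : Int) 1).foldl
    (fun anc j =>
      let p := pvParent nodes j
      anc ++ [if p = -1 then [] else p :: PySem.List.pyGetD anc p []])
    []

def create_node_to_descendants_map_alt (nodes : List (List Int)) (children : List (Int × List Int)) (leaf_set : List Int) : List (Int × List Int) :=
  let n : Int := (nodes.length : Int)
  let anc := pvBuildAnc nodes
  let d0 := (PySem.List.pyRange 0 n 1).foldl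
    (fun d j => d.insert j PySem.Set.empty) PySem.Dict.empty
  ((PySem.List.pyRange 0 n 1).foldl
    (fun d j => (PySem.List.pyGetD anc j []).foldl
        (fun d a => d.modify a PySem.Set.empty (fun s => PySem.Set.add s j)) d)
    d0).items

-- ===== PRECONDITION & SPEC =====
-- Pre_ excludes exactly the inputs where A raises or diverges: a row shorter than 2
-- (IndexError), or a parent pointer that is neither -1 nor a strictly smaller
-- nonnegative id (KeyError on a not-yet-inserted key, or an infinite while loop).
def Pre_create_node_to_descendants_map (nodes : List (List Int)) (children : List (Int × List Int)) (leaf_set : List Int) : Prop :=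
  ∀ i, i < nodes.length →
    2 ≤ (nodes.getD i []).length ∧
    (pvParent nodes (i : Int) = -1 ∨ (0 ≤ pvParent nodes (i : Int) ∧ pvParent nodes (i : Int) < (i : Int)))
instance (nodes : List (List Int)) (children : List (Int × List Int)) (leaf_set : List Int) : Decidable (Pre_create_node_to_descendants_map nodes children leaf_set) := by unfold Pre_create_node_to_descendants_map; infer_instance

def pvWitness_create_node_to_descendants_map : List (List Int) × (List (Int × List Int)) × List Int :=
  ([[0, -1], [0, 0], [0, 1], [0, 0]], [], [])

def Spec_create_node_to_descendants_map (nodes : List (List Int)) (children : List (Int × List Int)) (leaf_set : List Int) (out : List (Int × List Int)) : Prop := out = create_node_to_descendants_map_alt nodes children leaf_set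
instance (nodes : List (List Int)) (children : List (Int × List Int)) (leaf_set : List Int) (out : List (Int × List Int)) : Decidable (Spec_create_node_to_descendants_map nodes children leaf_set out) := by unfold Spec_create_node_to_descendants_map; infer_instance

-- ===== CLAIM (what is proved, stated in full; the proofs are below) =====
def Claim_equal_create_node_to_descendants_map : Prop := ∀ (nodes : List (List Int)) (children : List (Int × List Int)) (leaf_set : List Int), Dom_create_node_to_descendants_map nodes children leaf_set → Pre_create_node_to_descendants_map nodes children leaf_set → Spec_create_node_to_descendants_map nodes children leaf_set (create_node_to_descendants_map nodes children leaf_set)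

-- ===== LEMMAS AND PROOFS =====

-- the pure ancestor chain of cur (cur itself first), with fuel
def pvChain (nodes : List (List Int)) : Nat → Int → List Int
  | 0, _ => []
  | fuel+1, cur => if cur = -1 then [] else cur :: pvChain nodes fuel (pvParent nodes cur)

-- hypothesis Hp: every id in [0,n) has parent -1 or strictly smaller nonnegative
def pvHp (nodes : List (List Int)) : Prop :=
  ∀ c : Int, 0 ≤ c → c < (nodes.length : Int) →
    pvParent nodes c = -1 ∨ (0 ≤ pvParent nodes c ∧ pvParent nodes c < c)

theorem pvHp_of_pre (nodes : List (List Int)) (children : List (Int × List Int)) (leaf_set : List Int)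
    (h : Pre_create_node_to_descendants_map nodes children leaf_set) : pvHp nodes := by
  intro c hc0 hcn
  have h1 : c.toNat < nodes.length := by omega
  have h2 := (h c.toNat h1).2
  have h3 : ((c.toNat : Int)) = c := by omega
  rw [h3] at h2
  exact h2

theorem pvChain_neg_one (nodes : List (List Int)) (fuel : Nat) : pvChain nodes fuel (-1) = [] := by
  cases fuel <;> simp [pvChain]

-- fuel irrelevance under Hp

-- chain members: 0 ≤ x ≤ cur and no duplicates


-- canonical chain of node j's proper ancestors
def pvAncOf (nodes : List (List Int)) (j : Int) : List Int :=
  pvChain nodes nodes.length (pvParent nodes j)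


theorem pvChain_fuel (nodes : List (List Int)) (hp : pvHp nodes) :
    ∀ (fuel fuel' : Nat) (cur : Int),
      (cur = -1 ∨ (0 ≤ cur ∧ cur < (nodes.length : Int))) →
      cur + 1 ≤ (fuel : Int) → cur + 1 ≤ (fuel' : Int) →
      pvChain nodes fuel cur = pvChain nodes fuel' cur := by
  intro fuel
  induction fuel with
  | zero =>
    intro fuel' cur hc h1 h2
    rcases hc with rfl | h
    · rw [pvChain_neg_one, pvChain_neg_one]
    · omega
  | succ f ih =>
    intro fuel' cur hc h1 h2
    rcases hc with rfl | ⟨h0, hn⟩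
    · rw [pvChain_neg_one, pvChain_neg_one]
    · have hne : ¬ (cur = -1) := by omega
      cases fuel' with
      | zero => omega
      | succ f' =>
        simp only [pvChain, if_neg hne]
        rcases hp cur h0 hn with hpe | ⟨hp0, hpl⟩
        · rw [hpe, pvChain_neg_one, pvChain_neg_one]
        · rw [ih f' (pvParent nodes cur) (Or.inr ⟨hp0, by omega⟩) (by omega) (by omega)]

theorem pvChain_mem (nodes : List (List Int)) (hp : pvHp nodes) :
    ∀ (fuel : Nat) (cur : Int),
      (cur = -1 ∨ (0 ≤ cur ∧ cur < (nodes.length : Int))) →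
      ∀ x ∈ pvChain nodes fuel cur, 0 ≤ x ∧ x ≤ cur := by
  intro fuel
  induction fuel with
  | zero => intro cur _ x hx; simp [pvChain] at hx
  | succ f ih =>
    intro cur hc x hx
    rcases hc with rfl | ⟨h0, hn⟩
    · rw [pvChain_neg_one] at hx; simp at hx
    · have hne : ¬ (cur = -1) := by omega
      simp only [pvChain, if_neg hne, List.mem_cons] at hx
      rcases hx with rfl | hx
      · exact ⟨h0, le_refl _⟩
      · rcases hp cur h0 hn with hpe | ⟨hp0, hpl⟩
        · rw [hpe, pvChain_neg_one] at hx; simp at hx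
        · have := ih (pvParent nodes cur) (Or.inr ⟨hp0, by omega⟩) x hx
          omega

theorem pvChain_nodup (nodes : List (List Int)) (hp : pvHp nodes) :
    ∀ (fuel : Nat) (cur : Int),
      (cur = -1 ∨ (0 ≤ cur ∧ cur < (nodes.length : Int))) →
      (pvChain nodes fuel cur).Nodup := by
  intro fuel
  induction fuel with
  | zero => intro cur _; simp [pvChain]
  | succ f ih =>
    intro cur hc
    rcases hc with rfl | ⟨h0, hn⟩
    · rw [pvChain_neg_one]; exact List.nodup_nil
    · have hne : ¬ (cur = -1) := by omega
      simp only [pvChain, if_neg hne]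
      rcases hp cur h0 hn with hpe | ⟨hp0, hpl⟩
      · rw [hpe, pvChain_neg_one]; simp
      · refine List.nodup_cons.mpr ⟨fun hx => ?_, ih (pvParent nodes cur) (Or.inr ⟨hp0, by omega⟩)⟩
        have := pvChain_mem nodes hp f (pvParent nodes cur) (Or.inr ⟨hp0, by omega⟩) cur hx
        omega

theorem pvAncOf_mem (nodes : List (List Int)) (hp : pvHp nodes)
    (j : Int) (hj0 : 0 ≤ j) (hjn : j < (nodes.length : Int)) :
    ∀ x ∈ pvAncOf nodes j, 0 ≤ x ∧ x < j := by
  intro x hx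
  unfold pvAncOf at hx
  rcases hp j hj0 hjn with hpe | ⟨hp0, hpl⟩
  · rw [hpe, pvChain_neg_one] at hx; simp at hx
  · have := pvChain_mem nodes hp nodes.length (pvParent nodes j) (Or.inr ⟨hp0, by omega⟩) x hx
    omega

-- A's while loop is the fold of modify over the chain
theorem pvWalkA_eq (nodes : List (List Int)) :
    ∀ (fuel : Nat) (cur j : Int) (m : PySem.Dict Int (PySem.Set Int)),
      pvWalkA nodes fuel cur j m =
        (pvChain nodes fuel cur).foldl
          (fun m a => m.modify a PySem.Set.empty (fun s => PySem.Set.add s j)) m := by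
  intro fuel
  induction fuel with
  | zero => intro cur j m; simp [pvWalkA, pvChain]
  | succ f ih =>
    intro cur j m
    by_cases h : cur = -1 <;> simp [pvWalkA, pvChain, h, ih]

-- effect of a modify-add fold on getD
theorem pvModFold_getD (j : Int) :
    ∀ (L : List Int) (hL : L.Nodup) (d : PySem.Dict Int (PySem.Set Int)) (k : Int),
      ((L.foldl (fun m a => m.modify a PySem.Set.empty (fun s => PySem.Set.add s j)) d).getD k PySem.Set.empty)
        = if k ∈ L then PySem.Set.add (d.getD k PySem.Set.empty) j else d.getD k PySem.Set.empty := by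
  intro L
  induction L with
  | nil => intro _ d k; simp
  | cons a L ih =>
    intro hL d k
    have hnd := List.nodup_cons.mp hL
    simp only [List.foldl_cons]
    rw [ih hnd.2]
    by_cases hk : k = a
    · subst hk
      have hkL : k ∉ L := hnd.1
      simp only [if_neg hkL, List.mem_cons, true_or]
      rw [PySem.Dict.getD_modify]
      simp
    · rw [PySem.Dict.getD_modify]
      simp only [if_neg hk, List.mem_cons]
      by_cases hkL : k ∈ L
      · simp [hkL]
      · simp [hkL, hk]

-- effect of a modify fold on keys when all touched keys are present
theorem pvModFold_keys (j : Int) :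
    ∀ (L : List Int) (d : PySem.Dict Int (PySem.Set Int)), (∀ a ∈ L, a ∈ d.keys) →
      (L.foldl (fun m a => m.modify a PySem.Set.empty (fun s => PySem.Set.add s j)) d).keys = d.keys := by
  intro L
  induction L with
  | nil => intro d _; simp
  | cons a L ih =>
    intro d hmem
    simp only [List.foldl_cons]
    have hka : (d.modify a PySem.Set.empty (fun s => PySem.Set.add s j)).keys = d.keys := by
      rw [PySem.Dict.keys_modify, PySem.Dict.keys_insert_of_contains]
      exact (PySem.Dict.contains_iff_mem_keys d a).mpr (hmem a List.mem_cons_self)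
    rw [ih _ (fun b hb => by rw [hka]; exact hmem b (List.mem_cons_of_mem a hb)), hka]

-- buildAnc computes the canonical chains
theorem pvBuildAnc_prefix (nodes : List (List Int)) (hp : pvHp nodes) :
    ∀ m, m ≤ nodes.length →
      (PySem.List.pyRange 0 (m : Int) 1).foldl
        (fun anc j =>
          let p := pvParent nodes j
          anc ++ [if p = -1 then [] else p :: PySem.List.pyGetD anc p []]) [] =
      (List.range m).map (fun j : Nat => pvAncOf nodes (j : Int)) := by
  intro m
  induction m with
  | zero => simp [PySem.List.pyRange_one_eq_nil (le_refl (0 : Int))]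
  | succ m ih =>
    intro hm
    have hcast : ((m + 1 : Nat) : Int) = (m : Int) + 1 := by push_cast; ring
    rw [hcast, PySem.List.pyRange_one_succ_right (by positivity), List.foldl_append,
        ih (by omega), List.range_succ, List.map_append]
    simp only [List.foldl_cons, List.foldl_nil, List.map_cons, List.map_nil]
    congr 1
    have hmn : (m : Int) < (nodes.length : Int) := by omega
    rcases hp (m : Int) (by positivity) hmn with hpe | ⟨hp0, hpl⟩
    · simp [hpe, pvAncOf, pvChain_neg_one]
    · have hne : ¬ (pvParent nodes (m : Int) = -1) := by omega
      simp only [if_neg hne]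
      set p := pvParent nodes (m : Int) with hpdef
      have hlen : p < (((List.range m).map (fun j : Nat => pvAncOf nodes (j : Int))).length : Int) := by
        simp; omega
      rw [PySem.List.pyGetD_eq_getElem _ _ hp0 hlen]
      rw [List.getElem_map, List.getElem_range]
      have hptn : ((p.toNat : Int)) = p := by omega
      rw [hptn]
      unfold pvAncOf
      have hpne : ¬ (p = -1) := by omega
      have hpar := hp p hp0 (by omega)
      have hn1 : nodes.length = (nodes.length - 1) + 1 := by omega
      have key : pvChain nodes nodes.length p = p :: pvChain nodes nodes.length (pvParent nodes p) := by
        calc pvChain nodes nodes.length p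
            = pvChain nodes ((nodes.length - 1) + 1) p := by rw [← hn1]
          _ = p :: pvChain nodes (nodes.length - 1) (pvParent nodes p) := by
              simp [pvChain, hpne]
          _ = p :: pvChain nodes nodes.length (pvParent nodes p) := by
              refine congrArg (p :: ·) (pvChain_fuel nodes hp (nodes.length - 1) nodes.length (pvParent nodes p) ?_ ?_ ?_)
              · rcases hpar with h | h
                · exact Or.inl h
                · exact Or.inr ⟨h.1, by omega⟩
              · rcases hpar with h | h <;> omega
              · rcases hpar with h | h <;> omega
      rw [key]

theorem pvBuildAnc_get (nodes : List (List Int)) (hp : pvHp nodes) (j : Nat) (hj : j < nodes.length) :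
    PySem.List.pyGetD (pvBuildAnc nodes) (j : Int) [] = pvAncOf nodes (j : Int) := by
  have h : pvBuildAnc nodes = (List.range nodes.length).map (fun j : Nat => pvAncOf nodes (j : Int)) :=
    pvBuildAnc_prefix nodes hp nodes.length (le_refl _)
  rw [h, PySem.List.pyGetD_natCast]
  rw [List.getD_eq_getElem?_getD, List.getElem?_map]
  simp [hj]

-- prefix characterisation of A's fold
def pvAFold (nodes : List (List Int)) (m : Nat) : PySem.Dict Int (PySem.Set Int) :=
  (PySem.List.pyRange 0 (m : Int) 1).foldl
    (fun d j => pvWalkA nodes nodes.length (pvParent nodes j) j (d.insert j PySem.Set.empty))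
    PySem.Dict.empty

def pvDesc (nodes : List (List Int)) (m : Nat) (k : Int) : List Int :=
  (PySem.List.pyRange 0 (m : Int) 1).filter (fun j => decide (k ∈ pvAncOf nodes j))

theorem pvAFold_spec (nodes : List (List Int)) (hp : pvHp nodes) :
    ∀ m, m ≤ nodes.length →
      (pvAFold nodes m).keys = PySem.List.pyRange 0 (m : Int) 1 ∧
      ∀ k, (pvAFold nodes m).getD k PySem.Set.empty = pvDesc nodes m k := by
  intro m
  induction m with
  | zero =>
    intro _
    constructor
    · unfold pvAFold
      simp [PySem.List.pyRange_one_eq_nil (le_refl (0 : Int))]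
    · intro k
      unfold pvAFold pvDesc
      simp [PySem.List.pyRange_one_eq_nil (le_refl (0 : Int))]
  | succ m ih =>
    intro hm
    obtain ⟨ihk, ihv⟩ := ih (by omega)
    have hcast : ((m + 1 : Nat) : Int) = (m : Int) + 1 := by push_cast; ring
    have hmn : (m : Int) < (nodes.length : Int) := by omega
    have hsucc : pvAFold nodes (m + 1) =
        pvWalkA nodes nodes.length (pvParent nodes (m : Int)) (m : Int)
          ((pvAFold nodes m).insert (m : Int) PySem.Set.empty) := by
      unfold pvAFold
      rw [hcast, PySem.List.pyRange_one_succ_right (by positivity), List.foldl_append]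
      simp
    have hcond : pvParent nodes (m : Int) = -1 ∨
        (0 ≤ pvParent nodes (m : Int) ∧ pvParent nodes (m : Int) < (nodes.length : Int)) := by
      rcases hp (m : Int) (by positivity) hmn with h | h
      · exact Or.inl h
      · exact Or.inr ⟨h.1, by omega⟩
    have hwalk : pvAFold nodes (m + 1) =
        (pvAncOf nodes (m : Int)).foldl
          (fun d a => d.modify a PySem.Set.empty (fun s => PySem.Set.add s (m : Int)))
          ((pvAFold nodes m).insert (m : Int) PySem.Set.empty) := by
      rw [hsucc, pvWalkA_eq]
      have : pvChain nodes nodes.length (pvParent nodes (m : Int)) = pvAncOf nodes (m : Int) := rfl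
      rw [this]
    have hLb : ∀ x ∈ pvAncOf nodes (m : Int), 0 ≤ x ∧ x < (m : Int) :=
      pvAncOf_mem nodes hp (m : Int) (by positivity) hmn
    have hmnotin : ((m : Int)) ∉ (pvAFold nodes m).keys := by
      rw [ihk]
      simp [PySem.List.mem_pyRange_one]
    have hcontains : (pvAFold nodes m).contains (m : Int) = false :=
      Bool.eq_false_iff.mpr (fun h => hmnotin ((PySem.Dict.contains_iff_mem_keys _ _).mp h))
    have hkeysins : ((pvAFold nodes m).insert (m : Int) PySem.Set.empty).keys =
        PySem.List.pyRange 0 (m : Int) 1 ++ [(m : Int)] := by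
      rw [PySem.Dict.keys_insert_of_not_contains _ _ hcontains, ihk]
    have hnodup : (pvAncOf nodes (m : Int)).Nodup :=
      pvChain_nodup nodes hp nodes.length (pvParent nodes (m : Int)) hcond
    have hdesc : ∀ k, pvDesc nodes (m + 1) k =
        pvDesc nodes m k ++ (if k ∈ pvAncOf nodes (m : Int) then [(m : Int)] else []) := by
      intro k
      unfold pvDesc
      rw [hcast, PySem.List.pyRange_one_succ_right (by positivity), List.filter_append]
      simp [List.filter_cons, decide_eq_true_eq]
    have hdm : ∀ k, (m : Int) ∉ pvDesc nodes m k := by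
      intro k hk
      have := List.mem_of_mem_filter hk
      rw [PySem.List.mem_pyRange_one] at this
      omega
    constructor
    · rw [hwalk, pvModFold_keys _ _ _ ?_, hkeysins, hcast,
          ← PySem.List.pyRange_one_succ_right (by positivity)]
      intro a ha
      rw [hkeysins]
      refine List.mem_append.mpr (Or.inl ?_)
      rw [PySem.List.mem_pyRange_one]
      exact ⟨(hLb a ha).1, (hLb a ha).2⟩
    · intro k
      rw [hwalk, pvModFold_getD _ _ hnodup, PySem.Dict.getD_insert, hdesc k]
      by_cases hkm : k = (m : Int)
      · subst hkm
        have hknotL : ((m : Int)) ∉ pvAncOf nodes (m : Int) := fun h => by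
          have := hLb _ h; omega
        have hdmm : pvDesc nodes m ((m : Int)) = [] := by
          refine List.filter_eq_nil_iff.mpr ?_
          intro j hj
          rw [PySem.List.mem_pyRange_one] at hj
          simp only [decide_eq_true_eq]
          intro hmem
          have := pvAncOf_mem nodes hp j (by omega) (by omega) _ hmem
          omega
        simp [hknotL, hdmm]
      · rw [if_neg hkm, ihv k]
        by_cases hkL : k ∈ pvAncOf nodes (m : Int)
        · rw [if_pos hkL, if_pos hkL, PySem.Set.add_of_not_mem (hdm k)]
        · rw [if_neg hkL, if_neg hkL, List.append_nil]


-- prefix characterisation of B's folds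
def pvD0 (nodes : List (List Int)) (m : Nat) : PySem.Dict Int (PySem.Set Int) :=
  (PySem.List.pyRange 0 (m : Int) 1).foldl
    (fun d j => d.insert j PySem.Set.empty) PySem.Dict.empty

def pvBFold (nodes : List (List Int)) (m : Nat) : PySem.Dict Int (PySem.Set Int) :=
  (PySem.List.pyRange 0 (m : Int) 1).foldl
    (fun d j => (PySem.List.pyGetD (pvBuildAnc nodes) j []).foldl
        (fun d a => d.modify a PySem.Set.empty (fun s => PySem.Set.add s j)) d)
    (pvD0 nodes nodes.length)

theorem pvD0_succ (nodes : List (List Int)) (m : Nat) :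
    pvD0 nodes (m + 1) = (pvD0 nodes m).insert (m : Int) PySem.Set.empty := by
  unfold pvD0
  have hcast : ((m + 1 : Nat) : Int) = (m : Int) + 1 := by push_cast; ring
  rw [hcast, PySem.List.pyRange_one_succ_right (by positivity), List.foldl_append]
  simp

theorem pvD0_keys (nodes : List (List Int)) (m : Nat) :
    (pvD0 nodes m).keys = PySem.List.pyRange 0 (m : Int) 1 := by
  induction m with
  | zero =>
    unfold pvD0
    simp [PySem.List.pyRange_one_eq_nil (le_refl (0 : Int))]
  | succ m ih =>
    have hcontains : (pvD0 nodes m).contains (m : Int) = false := by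
      refine Bool.eq_false_iff.mpr (fun h => ?_)
      have := (PySem.Dict.contains_iff_mem_keys _ _).mp h
      rw [ih, PySem.List.mem_pyRange_one] at this
      omega
    have hcast : ((m + 1 : Nat) : Int) = (m : Int) + 1 := by push_cast; ring
    rw [pvD0_succ, PySem.Dict.keys_insert_of_not_contains _ _ hcontains, ih, hcast,
        ← PySem.List.pyRange_one_succ_right (by positivity)]

theorem pvD0_getD (nodes : List (List Int)) (m : Nat) (k : Int) :
    (pvD0 nodes m).getD k PySem.Set.empty = PySem.Set.empty := by
  induction m with
  | zero =>
    unfold pvD0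
    simp [PySem.List.pyRange_one_eq_nil (le_refl (0 : Int))]
  | succ m ih =>
    rw [pvD0_succ, PySem.Dict.getD_insert]
    by_cases h : k = (m : Int)
    · rw [if_pos h]
    · rw [if_neg h]; exact ih


theorem pvBFold_spec (nodes : List (List Int)) (hp : pvHp nodes) :
    ∀ m, m ≤ nodes.length →
      (pvBFold nodes m).keys = PySem.List.pyRange 0 ((nodes.length : Nat) : Int) 1 ∧
      ∀ k, (pvBFold nodes m).getD k PySem.Set.empty = pvDesc nodes m k := by
  intro m
  induction m with
  | zero =>
    intro _
    have h0 : pvBFold nodes 0 = pvD0 nodes nodes.length := by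
      unfold pvBFold
      simp [PySem.List.pyRange_one_eq_nil (le_refl (0 : Int))]
    constructor
    · rw [h0, pvD0_keys]
    · intro k
      rw [h0, pvD0_getD]
      unfold pvDesc
      simp [PySem.List.pyRange_one_eq_nil (le_refl (0 : Int))]
  | succ m ih =>
    intro hm
    obtain ⟨ihk, ihv⟩ := ih (by omega)
    have hcast : ((m + 1 : Nat) : Int) = (m : Int) + 1 := by push_cast; ring
    have hmn : (m : Int) < (nodes.length : Int) := by omega
    have hsucc : pvBFold nodes (m + 1) =
        (pvAncOf nodes (m : Int)).foldl
          (fun d a => d.modify a PySem.Set.empty (fun s => PySem.Set.add s (m : Int)))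
          (pvBFold nodes m) := by
      unfold pvBFold
      rw [hcast, PySem.List.pyRange_one_succ_right (by positivity), List.foldl_append]
      simp only [List.foldl_cons, List.foldl_nil]
      rw [pvBuildAnc_get nodes hp m (by omega)]
    have hcond : pvParent nodes (m : Int) = -1 ∨
        (0 ≤ pvParent nodes (m : Int) ∧ pvParent nodes (m : Int) < (nodes.length : Int)) := by
      rcases hp (m : Int) (by positivity) hmn with h | h
      · exact Or.inl h
      · exact Or.inr ⟨h.1, by omega⟩
    have hLb : ∀ x ∈ pvAncOf nodes (m : Int), 0 ≤ x ∧ x < (m : Int) :=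
      pvAncOf_mem nodes hp (m : Int) (by positivity) hmn
    have hnodup : (pvAncOf nodes (m : Int)).Nodup :=
      pvChain_nodup nodes hp nodes.length (pvParent nodes (m : Int)) hcond
    have hdesc : ∀ k, pvDesc nodes (m + 1) k =
        pvDesc nodes m k ++ (if k ∈ pvAncOf nodes (m : Int) then [(m : Int)] else []) := by
      intro k
      unfold pvDesc
      rw [hcast, PySem.List.pyRange_one_succ_right (by positivity), List.filter_append]
      simp [List.filter_cons, decide_eq_true_eq]
    have hdm : ∀ k, (m : Int) ∉ pvDesc nodes m k := by
      intro k hk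
      have := List.mem_of_mem_filter hk
      rw [PySem.List.mem_pyRange_one] at this
      omega
    constructor
    · rw [hsucc, pvModFold_keys _ _ _ ?_, ihk]
      intro a ha
      rw [ihk, PySem.List.mem_pyRange_one]
      have := hLb a ha
      omega
    · intro k
      rw [hsucc, pvModFold_getD _ _ hnodup, ihv k, hdesc k]
      by_cases hkL : k ∈ pvAncOf nodes (m : Int)
      · rw [if_pos hkL, if_pos hkL, PySem.Set.add_of_not_mem (hdm k)]
      · rw [if_neg hkL, if_neg hkL, List.append_nil]


-- ===== VERDICT (by name: the statement is the Claim_ definition above) =====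
theorem create_node_to_descendants_map_spec : Claim_equal_create_node_to_descendants_map := by
  intro nodes children leaf_set _hdom hpre
  unfold Spec_create_node_to_descendants_map
  have hp := pvHp_of_pre nodes children leaf_set hpre
  obtain ⟨hak, hav⟩ := pvAFold_spec nodes hp nodes.length (le_refl _)
  obtain ⟨hbk, hbv⟩ := pvBFold_spec nodes hp nodes.length (le_refl _)
  have hA : create_node_to_descendants_map nodes children leaf_set = (pvAFold nodes nodes.length).items := rfl
  have hB : create_node_to_descendants_map_alt nodes children leaf_set = (pvBFold nodes nodes.length).items := rfl
  rw [hA, hB,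
      PySem.Dict.items_eq_map_keys _ (by rw [hak]; exact PySem.List.nodup_pyRange_one _ _) PySem.Set.empty,
      PySem.Dict.items_eq_map_keys _ (by rw [hbk]; exact PySem.List.nodup_pyRange_one _ _) PySem.Set.empty,
      hak, hbk]
  exact List.map_congr_left (fun k _ => by rw [hav k, hbv k])
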